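-- pv_equiv track=rewrite | github.com/AdamZhouSE/pythonHomework | Code/CodeRecords/2578/60692/278845.py | calculate
-- ===== SOURCE A (Python) =====
-- def calculate(i, list2: list):
--     sum = 0
--     for j in list2:
--         if j % i == 0:
--             sum += j // i
--         else:
--             sum += ((j // i) + 1)
--     return sum
-- ===== SOURCE B (Python) =====
-- def calculate(i, list2: list):
--     counts = {}
--     for j in list2:
--         counts[j] = counts.get(j, 0) + 1
--     total = 0
--     for j, c in counts.items():
--         total += c * -((-j) // i)
--     return total
-- ===== Notes on version B (the rewrite author's own statement) =====
-- stated objective: alternative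
-- what changed: B groups the list into a frequency dictionary and aggregates once per distinct value, computing each ceiling branch-free via the identity ceil(j/i) = -((-j)//i), instead of A's per-element branch on j % i.
import Mathlib
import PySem

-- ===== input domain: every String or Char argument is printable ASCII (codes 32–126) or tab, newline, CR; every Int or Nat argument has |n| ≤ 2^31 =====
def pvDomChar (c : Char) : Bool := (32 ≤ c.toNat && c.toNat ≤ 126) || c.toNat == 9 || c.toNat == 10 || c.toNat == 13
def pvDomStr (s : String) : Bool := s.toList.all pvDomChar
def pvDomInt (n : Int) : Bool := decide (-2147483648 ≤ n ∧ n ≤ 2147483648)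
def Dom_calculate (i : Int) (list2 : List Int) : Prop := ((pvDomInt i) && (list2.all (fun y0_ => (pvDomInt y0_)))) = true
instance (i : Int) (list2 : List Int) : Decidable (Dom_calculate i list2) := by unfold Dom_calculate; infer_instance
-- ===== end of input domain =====

-- B groups list2 into a frequency dict and aggregates once per distinct value, using ceil(j/i) = -((-j)//i) branch-free.
-- ===== PORT A =====
def calculate (i : Int) (list2 : List Int) : Int :=
  list2.foldl (fun sum j =>
    if PySem.Int.mod j i == 0 then sum + PySem.Int.floordiv j i
    else sum + (PySem.Int.floordiv j i + 1)) 0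

-- ===== PORT B =====
def calculate_alt (i : Int) (list2 : List Int) : Int :=
  let counts : PySem.Dict Int Int :=
    list2.foldl (fun d j => d.insert j (d.getD j 0 + 1)) PySem.Dict.empty
  counts.items.foldl (fun total p => total + p.2 * (-(PySem.Int.floordiv (-p.1) i))) 0

-- ===== PRECONDITION & SPEC =====
-- Pre_ excludes only i = 0 with a nonempty list, on which A (and B) raise ZeroDivisionError.
def Pre_calculate (i : Int) (list2 : List Int) : Prop := i ≠ 0 ∨ list2 = []
instance (i : Int) (list2 : List Int) : Decidable (Pre_calculate i list2) := by unfold Pre_calculate; infer_instance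
def pvWitness_calculate : Int × List Int := (3, [1, 2, -7, 2])

def Spec_calculate (i : Int) (list2 : List Int) (out : Int) : Prop := out = calculate_alt i list2
instance (i : Int) (list2 : List Int) (out : Int) : Decidable (Spec_calculate i list2 out) := by unfold Spec_calculate; infer_instance

-- ===== CLAIM (what is proved, stated in full; the proofs are below) =====
def Claim_equal_calculate : Prop := ∀ (i : Int) (list2 : List Int), Dom_calculate i list2 → Pre_calculate i list2 → Spec_calculate i list2 (calculate i list2)

-- ===== LEMMAS AND PROOFS =====

-- ceil(j/i) as a branch on the remainder equals -((-j)//i), positive divisor.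
lemma ceil_eq_pos (i j : Int) (hi : 0 < i) :
    (if PySem.Int.mod j i = 0 then PySem.Int.floordiv j i else PySem.Int.floordiv j i + 1)
      = -(PySem.Int.floordiv (-j) i) := by
  have hfm := PySem.Int.floordiv_mul_add_mod j i
  have hr0 := PySem.Int.mod_nonneg j hi
  have hrlt := PySem.Int.mod_lt j hi
  symm
  by_cases h : PySem.Int.mod j i = 0
  · rw [if_pos h]
    rw [PySem.Int.neg_floordiv_neg_eq_iff_of_pos hi]
    constructor <;> nlinarith
  · rw [if_neg h]
    rw [PySem.Int.neg_floordiv_neg_eq_iff_of_pos hi]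
    constructor <;> nlinarith [lt_of_le_of_ne hr0 (Ne.symm h)]

-- the same identity for every nonzero divisor, reducing i < 0 to the positive case via floordiv_neg_neg / mod_neg_neg.
lemma ceil_eq (i j : Int) (hi : i ≠ 0) :
    (if PySem.Int.mod j i = 0 then PySem.Int.floordiv j i else PySem.Int.floordiv j i + 1)
      = -(PySem.Int.floordiv (-j) i) := by
  rcases lt_or_gt_of_ne hi with hneg | hpos
  · have h1 : PySem.Int.floordiv j i = PySem.Int.floordiv (-j) (-i) := by
      rw [← PySem.Int.floordiv_neg_neg (-j) (-i)]; simp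
    have h2 : PySem.Int.mod j i = -(PySem.Int.mod (-j) (-i)) := by
      rw [← PySem.Int.mod_neg_neg (-j) (-i)]; simp
    have h3 : PySem.Int.floordiv (-j) i = PySem.Int.floordiv j (-i) := by
      rw [← PySem.Int.floordiv_neg_neg j (-i)]; simp
    have hpos' : (0:Int) < -i := by omega
    have base := ceil_eq_pos (-i) (-j) hpos'
    by_cases h : PySem.Int.mod j i = 0
    · have h' : PySem.Int.mod (-j) (-i) = 0 := by rw [h2] at h; omega
      rw [if_pos h, if_pos h'] at *
      rw [h1, h3]
      simpa using base
    · have h' : PySem.Int.mod (-j) (-i) ≠ 0 := by rw [h2] at h; omega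
      rw [if_neg h, if_neg h'] at *
      rw [h1, h3]
      simpa using base
  · exact ceil_eq_pos i j hpos

-- dropping one element from a Nodup list: the sum over PySem.Set.discard.
lemma sum_map_discard (s : List Int) (hs : s.Nodup) (x : Int) (g : Int → Int) :
    ((PySem.Set.discard s x).map g).sum
      = (s.map g).sum - (if x ∈ s then g x else 0) := by
  induction s with
  | nil => simp [PySem.Set.discard]
  | cons y t ih =>
    have hnd := (List.nodup_cons.mp hs)
    by_cases hxy : y = x
    · subst hxy
      have hxt : y ∉ t := hnd.1
      have hdis : PySem.Set.discard (y :: t) y = t := by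
        simp only [PySem.Set.discard, List.filter_cons, beq_self_eq_true, Bool.not_true,
          Bool.false_eq_true, if_neg, not_false_iff]
        exact List.filter_eq_self.mpr (fun a ha => by
          simp only [Bool.not_eq_eq_eq_not, Bool.not_true, beq_eq_false_iff_ne, ne_eq]
          exact fun h => hxt (h ▸ ha))
      simp [hdis]
    · have hdis : PySem.Set.discard (y :: t) x = y :: PySem.Set.discard t x := by
        simp [PySem.Set.discard, hxy]
      rw [hdis]
      simp only [List.map_cons, List.sum_cons, ih hnd.2]
      have hmem : (x ∈ y :: t) ↔ (x ∈ t) := by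
        constructor
        · intro h; rcases List.mem_cons.mp h with h | h
          · exact absurd h.symm hxy
          · exact h
        · exact fun h => List.mem_cons_of_mem _ h
      rw [if_congr hmem rfl rfl]; ring

-- summing count(k)·g(k) over the distinct values of l is summing g over l.
lemma sum_counts (l : List Int) (g : Int → Int) :
    ((PySem.Set.ofList l).map (fun k => (l.count k : Int) * g k)).sum
      = (l.map g).sum := by
  induction l with
  | nil => simp [PySem.Set.ofList]
  | cons x t ih =>
    rw [PySem.Set.ofList_cons]
    simp only [List.map_cons, List.sum_cons]
    have hmap : (PySem.Set.discard (PySem.Set.ofList t) x).map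
          (fun k => (((x :: t).count k : Nat) : Int) * g k)
        = (PySem.Set.discard (PySem.Set.ofList t) x).map
          (fun k => ((t.count k : Nat) : Int) * g k) := by
      apply List.map_congr_left
      intro k hk
      have hne := ((PySem.Set.mem_discard (PySem.Set.ofList t) x k).mp hk).2
      simp [Ne.symm hne]
    rw [hmap, sum_map_discard _ (PySem.Set.nodup_ofList t) x _, ih]
    have hx : (((x :: t).count x : Nat) : Int) = ((t.count x : Nat) : Int) + 1 := by
      simp
    by_cases hmemt : x ∈ t
    · have hmem' : x ∈ PySem.Set.ofList t := (PySem.Set.mem_ofList t x).mpr hmemt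
      rw [if_pos hmem', hx]; ring
    · have hmem' : x ∉ PySem.Set.ofList t := fun h => hmemt ((PySem.Set.mem_ofList t x).mp h)
      have hc0 : ((t.count x : Nat) : Int) = 0 := by
        simp [List.count_eq_zero_of_not_mem hmemt]
      rw [if_neg hmem', hx, hc0]; ring

-- ===== VERDICT (by name: the statement is the Claim_ definition above) =====
theorem calculate_spec : Claim_equal_calculate := by
  intro i list2 _ hpre
  unfold Spec_calculate calculate calculate_alt
  by_cases hi : i = 0
  · rcases hpre with h | h
    · exact absurd hi h
    · subst h; rfl
  · -- A's side: the branching fold is a plain sum of ceilings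
    have hcong : ∀ (acc : Int), ∀ x ∈ list2,
        (if PySem.Int.mod x i == 0 then acc + PySem.Int.floordiv x i
         else acc + (PySem.Int.floordiv x i + 1))
        = acc + (-(PySem.Int.floordiv (-x) i)) := by
      intro acc x _
      have hc := ceil_eq i x hi
      by_cases h : PySem.Int.mod x i = 0
      · rw [if_pos h] at hc
        simp [h, hc]
      · rw [if_neg h] at hc
        have hb : (PySem.Int.mod x i == 0) = false := by simpa using h
        rw [hb]
        simp only [Bool.false_eq_true, if_neg, not_false_iff]
        omega
    rw [PySem.List.foldl_congr_mem list2 _ _ 0 hcong]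
    rw [PySem.List.foldl_add]
    -- B's side: counter + items, then collapse the grouped sum
    rw [PySem.Dict.foldl_insert_getD_add_one_eq_counter]
    rw [PySem.List.foldl_add]
    rw [PySem.Dict.items_counter]
    rw [List.map_map]
    rw [show ((fun p : Int × Int => p.2 * -PySem.Int.floordiv (-p.1) i) ∘
          (fun k => (k, ((list2.count k : Nat) : Int))))
        = (fun k => ((list2.count k : Nat) : Int) * -(PySem.Int.floordiv (-k) i)) from rfl]
    rw [sum_counts list2 (fun k => -(PySem.Int.floordiv (-k) i))]
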